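-- pv_equiv track=rewrite | github.com/JoaoP4ulo/CryptoEmail | src/funcao.py | transformar_matriz
-- ===== SOURCE A (Python) =====
-- def transformar_matriz(lista_string):
--     matriz_int=[]
--     matriz_ext=[]
--
--     tam_frase = len(lista_string)
--
--     while tam_frase%4 != 0:
--         lista_string.append(0)
--         tam_frase = len(lista_string)
--     num_matriz=tam_frase//2
--
--     splited = [lista_string[i::num_matriz] for i in range(num_matriz)]
--     while len(splited) != 0:
--         matriz_int,splited=matriz_formar(splited)
--         matriz_ext.append(matriz_int)
--
--
--     return matriz_ext
--
-- def matriz_formar(matriz):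
--     matriz_int=[]
--
--     for i in range(2):
--         matriz_int.append(matriz[i])
--
--     if len(matriz) != 0:
--         del matriz[:2]
--
--     return matriz_int,matriz
-- ===== SOURCE B (Python) =====
-- def transformar_matriz(lista_string):
--     lista_string.extend([0] * (-len(lista_string) % 4))
--     half = len(lista_string) // 2
--     return [[[lista_string[j], lista_string[j + half]],
--              [lista_string[j + 1], lista_string[j + 1 + half]]]
--             for j in range(0, half, 2)]
-- ===== Notes on version B (the rewrite author's own statement) =====
-- stated objective: simpler
-- what changed: B replaces A's transpose-slice comprehension plus destructive two-at-a-time peel loop (whose repeated del matriz[:2] shifts the remaining list every iteration) by computing the zero-padding count arithmetically and building the nested result directly with one index-addressed comprehension over range(0, half, 2).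
import Mathlib
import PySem

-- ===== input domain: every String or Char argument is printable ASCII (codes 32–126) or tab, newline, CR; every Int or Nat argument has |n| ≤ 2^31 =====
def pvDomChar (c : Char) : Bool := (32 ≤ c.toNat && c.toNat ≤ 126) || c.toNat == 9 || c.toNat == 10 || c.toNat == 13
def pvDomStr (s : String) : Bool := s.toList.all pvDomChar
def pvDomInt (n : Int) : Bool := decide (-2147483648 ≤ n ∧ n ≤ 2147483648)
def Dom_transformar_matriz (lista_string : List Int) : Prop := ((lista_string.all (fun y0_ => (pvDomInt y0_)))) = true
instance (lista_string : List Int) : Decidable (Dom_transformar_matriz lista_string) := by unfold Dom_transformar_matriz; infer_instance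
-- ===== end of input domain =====

-- B replaces A's transpose-slice phase and del-based peel loop by one direct index-addressed
-- nested comprehension (objective: simpler). Both A and B pad the argument list in place
-- (mutation identical); the equivalence proved here is about the return value.


-- ===== PORT A =====
-- the while-loop 'while tam_frase%4 != 0: lista_string.append(0)'
def pvPadA (l : List Int) : List Int :=
  if l.length % 4 ≠ 0 then pvPadA (l ++ [0]) else l
termination_by (4 - l.length % 4) % 4
decreasing_by simp; omega

-- helper matriz_formar of A; 'matriz[i]' raises only for len < 2, which the caller
-- never produces (splited always has even length), so pyGetD with default [] is exact here
def matriz_formar (matriz : List (List Int)) : List (List Int) × List (List Int) :=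
  let matriz_int := (PySem.List.pyRange 0 2 1).foldl
      (fun acc i => acc ++ [PySem.List.pyGetD matriz i []]) []
  let matriz' := if matriz.length ≠ 0 then matriz.drop 2 else matriz  -- del matriz[:2]
  (matriz_int, matriz')

-- the while-loop 'while len(splited) != 0: matriz_int,splited=matriz_formar(splited); matriz_ext.append(matriz_int)'
def pvPeelA (splited : List (List Int)) : List (List (List Int)) :=
  if splited.length ≠ 0 then
    (matriz_formar splited).1 :: pvPeelA (matriz_formar splited).2
  else []
termination_by splited.length
decreasing_by
  rename_i h
  simp only [matriz_formar]
  split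
  · simp at h ⊢; omega
  · omega

def transformar_matriz (lista_string : List Int) : List (List (List Int)) :=
  let lista := pvPadA lista_string
  let num_matriz : Int := PySem.Int.floordiv (lista.length : Int) 2
  -- splited = [lista_string[i::num_matriz] for i in range(num_matriz)]
  -- slice? is none only for step 0, i.e. num_matriz = 0, when the range is empty: getD [] is exact
  let splited := (PySem.List.pyRange 0 num_matriz 1).map
      (fun i => (PySem.List.slice? lista (some i) none num_matriz).getD [])
  pvPeelA splited

-- ===== PORT B =====
def transformar_matriz_alt (lista_string : List Int) : List (List (List Int)) :=
  -- lista_string.extend([0] * (-len(lista_string) % 4))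
  let l := lista_string ++ List.replicate (PySem.Int.mod (-(lista_string.length : Int)) 4).toNat 0
  let half : Int := PySem.Int.floordiv (l.length : Int) 2
  -- indices j, j+1, j+half, j+1+half are always in range for j in range(0, half, 2): pyGetD 0 is exact
  (PySem.List.pyRange 0 half 2).map (fun j =>
    [[PySem.List.pyGetD l j 0, PySem.List.pyGetD l (j + half) 0],
     [PySem.List.pyGetD l (j + 1) 0, PySem.List.pyGetD l (j + 1 + half) 0]])

-- ===== PRECONDITION & SPEC =====
def Spec_transformar_matriz (lista_string : List Int) (out : List (List (List Int))) : Prop := out = transformar_matriz_alt lista_string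
instance (lista_string : List Int) (out : List (List (List Int))) : Decidable (Spec_transformar_matriz lista_string out) := by unfold Spec_transformar_matriz; infer_instance

-- ===== CLAIM (what is proved, stated in full; the proofs are below) =====
def Claim_equal_transformar_matriz : Prop := ∀ (lista_string : List Int), Dom_transformar_matriz lista_string → Spec_transformar_matriz lista_string (transformar_matriz lista_string)

-- ===== LEMMAS AND PROOFS =====

-- padding: both loops append the same (4 - len % 4) % 4 zeros
theorem pvPadA_eq (l : List Int) :
    pvPadA l = l ++ List.replicate ((4 - l.length % 4) % 4) 0 := by
  fun_induction pvPadA l with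
  | case1 l h ih =>
      rw [ih]
      simp at h ⊢
      have : (4 - l.length % 4) % 4 = ((4 - (l.length + 1) % 4) % 4) + 1 := by omega
      rw [this, List.replicate_succ]
  | case2 l h => simp at h; simp [h]

-- A's strided slice lista[i::half] is the two-element column [lista[i], lista[i+half]]
theorem slice_col (p : List Int) (half i : Nat) (hl : p.length = 2 * half) (hi : i < half) :
    PySem.List.slice? p (some (i : Int)) none (half : Int)
      = some [p.getD i 0, p.getD (i + half) 0] := by
  have hh : 0 < half := by omega
  simp only [PySem.List.slice?, PySem.List.sliceIndices]
  rw [if_neg (by exact_mod_cast hh.ne')]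
  simp only [hl]
  have h1 : ¬((half:Int) < 0) := by omega
  have h2 : (0:Int) < (half:Int) := by exact_mod_cast hh
  have h3 : ¬((i:Int) < 0) := by omega
  simp only [if_neg h1, if_neg h3, if_pos h2]
  have h4 : min (i:Int) (((2*half:Nat):Int)) = (i:Int) := by push_cast; omega
  rw [h4, if_pos (by push_cast; omega)]
  have hcount : ((((2*half : Nat) : Int) - i + half - 1) / half).toNat = 2 := by
    have e : (((2*half : Nat) : Int) - i + half - 1) = ((half:Int)-1-i) + (half:Int) * 2 := by
      push_cast; ring
    rw [e, Int.add_mul_ediv_left _ _ (by omega : (half:Int) ≠ 0),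
        Int.ediv_eq_zero_of_lt (by omega) (by omega)]
    rfl
  rw [hcount]
  have e1 : ((i:Int) + (half:Int) * ((0:Nat):Int)).toNat = i := by simp
  have e2 : ((i:Int) + (half:Int) * ((1:Nat):Int)).toNat = i + half := by simp; omega
  simp only [List.range_succ, List.range_zero, List.nil_append, List.cons_append,
    List.filterMap_cons, List.filterMap_nil, e1, e2,
    List.getElem?_eq_getElem (by omega : i < p.length),
    List.getElem?_eq_getElem (by omega : i + half < p.length)]
  simp [List.getD_eq_getElem?_getD, List.getElem?_eq_getElem (by omega : i < p.length),
    List.getElem?_eq_getElem (by omega : i + half < p.length)]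

theorem matriz_formar_cons (a b : List Int) (rest : List (List Int)) :
    matriz_formar (a :: b :: rest) = ([a, b], rest) := by
  simp [matriz_formar, PySem.List.pyRange, List.range_succ, PySem.List.pyGetD]

-- A's peel loop groups a list of even length into consecutive pairs
theorem peel_pairs (g : Nat → List Int) :
    ∀ (k j : Nat), pvPeelA ((List.range' j (2 * k)).map g)
      = (List.range' j k 2).map (fun t => [g t, g (t + 1)]) := by
  intro k
  induction k with
  | zero => intro j; simp [pvPeelA]
  | succ n ih =>
      intro j
      have h2 : 2 * (n + 1) = (2 * n) + 1 + 1 := by ring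
      rw [h2, List.range'_succ, List.range'_succ, List.range'_succ]
      rw [pvPeelA]
      simp only [List.map_cons, matriz_formar_cons]
      rw [if_pos (by simp)]
      rw [ih (j + 1 + 1)]

theorem range'_two (m : Nat) : ∀ s, List.range' s m 2 = (List.range m).map (fun k => s + 2*k) := by
  induction m with
  | zero => intro s; simp
  | succ n ih =>
      intro s
      rw [List.range'_succ, ih (s + 2), List.range_succ_eq_map]
      simp only [List.map_cons, List.map_map]
      refine List.cons_eq_cons.mpr ⟨by omega, ?_⟩
      apply List.map_congr_left; intro k _; simp [Function.comp]; omega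

-- ===== VERDICT (by name: the statement is the Claim_ definition above) =====
theorem transformar_matriz_spec : Claim_equal_transformar_matriz := by
  intro l _
  unfold Spec_transformar_matriz
  simp only [transformar_matriz, transformar_matriz_alt]
  have hpad : (PySem.Int.mod (-(l.length : Int)) 4).toNat = (4 - l.length % 4) % 4 := by
    rw [PySem.Int.mod_eq_emod_of_pos]
    · omega
    · omega
  rw [hpad, ← pvPadA_eq l]
  set p := pvPadA l with hp
  have hp4 : p.length % 4 = 0 := by
    rw [hp, pvPadA_eq l]; simp; omega
  set half : Nat := p.length / 2 with hhalf
  have hlen : p.length = 2 * half := by omega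
  have heven : half = 2 * (half / 2) := by omega
  have hfd : PySem.Int.floordiv (p.length : Int) 2 = ((half : Nat) : Int) := by
    rw [hhalf]; exact_mod_cast PySem.Int.floordiv_natCast p.length 2
  rw [hfd]
  -- A side: the slice comprehension is the column map, and the peel loop pairs it up
  rw [PySem.List.pyRange_one, List.map_map]
  have hts : ((half:Int) - 0).toNat = 2 * (half/2) := by omega
  rw [hts, List.range_eq_range', peel_pairs]
  -- B side: evaluate the step-2 range
  rw [PySem.List.pyRange_of_pos 0 (half:Int) (by omega : (0:Int) < 2)]
  have hcnt : (if (0:Int) < (half:Int) then ((((half:Int)) - 0 + 2 - 1) / 2).toNat else 0)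
      = half / 2 := by
    split <;> omega
  rw [hcnt, range'_two, List.map_map]
  rw [List.map_map]
  apply List.map_congr_left
  intro k hk
  simp only [List.mem_range] at hk
  simp only [Function.comp]
  have ha1 : (0:Int) + ((0 + 2*k : Nat) : Int) = (((2*k : Nat)) : Int) := by push_cast; ring
  have ha2 : (0:Int) + ((0 + 2*k + 1 : Nat) : Int) = (((2*k + 1 : Nat)) : Int) := by push_cast; ring
  rw [ha1, ha2, slice_col p half (2*k) hlen (by omega), slice_col p half (2*k+1) hlen (by omega)]
  rw [show ((0:Int) + 2 * (k:Int)) = (((2*k : Nat)) : Int) from by push_cast; ring]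
  rw [show (((2*k : Nat)) : Int) + (half:Int) = (((2*k + half : Nat)) : Int) from by push_cast; ring]
  rw [show (((2*k : Nat)) : Int) + 1 = (((2*k + 1 : Nat)) : Int) from by push_cast; ring]
  rw [show (((2*k + 1 : Nat)) : Int) + (half:Int) = (((2*k + 1 + half : Nat)) : Int) from by push_cast; ring]
  simp only [PySem.List.pyGetD_natCast]
  simp [List.getD]
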